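-- pv_equiv track=rewrite | github.com/Angeluso7/PyRevit_UI_IT | Gestion IT.tab/menu.panel/datos.pulldown/Carga de Datos.pushbutton/combinar_datos.py | upsert_by_codintbim
-- ===== SOURCE A (Python) =====
-- def upsert_by_codintbim(repo, fila_dict):
--     """
--     Actualiza o inserta una entrada en repo según CodIntBIM.
--
--     - Si existe alguna entrada con el mismo CodIntBIM, se actualizan sus campos.
--       No se sobrescriben Archivo ni ElementId si ya existen en el registro.
--     - Si no existe, se crea una nueva entrada con clave Archivo_ElementId
--       (o el propio código si faltan esos datos).
--     """
--     cod = (fila_dict.get("CodIntBIM") or "").strip()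
--     if not cod:
--         return repo
--
--     coincidentes = [
--         k for k, v in repo.items()
--         if (v.get("CodIntBIM") or "").strip() == cod
--     ]
--
--     if coincidentes:
--         for k in coincidentes:
--             d = repo[k]
--             for campo, valor in fila_dict.items():
--                 if campo in ("Archivo", "ElementId") and campo in d:
--                     continue
--                 d[campo] = valor
--     else:
--         archivo = fila_dict.get("Archivo", "")
--         elem_id = str(fila_dict.get("ElementId", "") or "")
--         clave = u"{}_{}".format(archivo, elem_id) if archivo and elem_id else cod
--         repo[clave] = dict(fila_dict)
--
--     return repo
-- ===== SOURCE B (Python) =====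
-- def _merge(v, fila_dict):
--     """Merged record: take v, overlay fila_dict, then restore the protected
--     fields Archivo/ElementId from v where v already had them."""
--     keep = {f: v[f] for f in ("Archivo", "ElementId") if f in v}
--     out = dict(v)
--     out.update(fila_dict)
--     out.update(keep)
--     return out
--
--
-- def upsert_by_codintbim(repo, fila_dict):
--     """Pure rebuild instead of in-place mutation: test membership against a
--     set of stripped codes built once, then produce the result dict by a
--     comprehension (merge-by-dict-union replaces the per-field update loop);
--     on a miss, copy repo and add the new entry. Returns a fresh dict."""
--     cod = (fila_dict.get("CodIntBIM") or "").strip()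
--     if not cod:
--         return repo
--     if cod in {(v.get("CodIntBIM") or "").strip() for v in repo.values()}:
--         return {k: _merge(v, fila_dict) if (v.get("CodIntBIM") or "").strip() == cod else v
--                 for k, v in repo.items()}
--     archivo = fila_dict.get("Archivo", "")
--     elem_id = str(fila_dict.get("ElementId", "") or "")
--     out = dict(repo)
--     out[u"{}_{}".format(archivo, elem_id) if archivo and elem_id else cod] = dict(fila_dict)
--     return out
-- ===== Notes on version B (the rewrite author's own statement) =====
-- stated objective: alternative
-- what changed: A mutates repo in place: it collects matching keys, then re-indexes the dict and runs a per-field loop with a continue to skip protected fields; B is a pure rebuild: it tests membership against a set of stripped codes built once, produces the result by a dict comprehension whose record update is a dict-union (copy, overlay fila_dict, restore the snapshotted protected fields) with no per-field conditional loop, and on a miss copies repo and adds the new entry.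
import Mathlib
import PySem

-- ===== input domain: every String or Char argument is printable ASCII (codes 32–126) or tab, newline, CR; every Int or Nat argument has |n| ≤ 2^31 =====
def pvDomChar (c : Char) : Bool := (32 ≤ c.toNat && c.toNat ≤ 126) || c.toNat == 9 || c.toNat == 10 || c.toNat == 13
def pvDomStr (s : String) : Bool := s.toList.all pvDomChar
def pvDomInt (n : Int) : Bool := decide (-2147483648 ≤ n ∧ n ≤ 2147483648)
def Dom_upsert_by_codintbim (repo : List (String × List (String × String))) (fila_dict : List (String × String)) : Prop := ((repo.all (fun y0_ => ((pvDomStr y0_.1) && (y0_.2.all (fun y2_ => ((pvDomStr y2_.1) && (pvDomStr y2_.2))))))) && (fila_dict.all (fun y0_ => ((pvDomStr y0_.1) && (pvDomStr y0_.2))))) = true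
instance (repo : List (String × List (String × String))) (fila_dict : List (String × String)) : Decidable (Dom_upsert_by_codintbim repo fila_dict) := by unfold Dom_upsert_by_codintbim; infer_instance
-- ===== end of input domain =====

-- B rebuilds the result purely (set-membership test, dict comprehension, merge-by-dict-union)
-- instead of A's in-place mutation; equivalence is about the RETURNED value only
-- (A also mutates repo in place, B does not).

-- ===== PORT A =====
-- (fila_dict.get("CodIntBIM") or "").strip() — values are strings, so `or ""` only maps a missing key to ""
def pvCod (d : List (String × String)) : String :=
  PySem.Str.strip ((PySem.Dict.mk d).getD "CodIntBIM" "")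

-- A's inner per-field loop: `for campo, valor in fila_dict.items(): if … continue; d[campo] = valor`
def pvUpd (d : List (String × String)) (fila_dict : List (String × String)) : List (String × String) :=
  (fila_dict.foldl (fun (dd : PySem.Dict String String) cv =>
      if (cv.1 == "Archivo" || cv.1 == "ElementId") && dd.contains cv.1 then dd
      else dd.insert cv.1 cv.2) (PySem.Dict.mk d)).items

-- A's else-branch: clave computation and repo[clave] = dict(fila_dict)
def pvInsertNew (repo : List (String × List (String × String))) (fila_dict : List (String × String)) (cod : String) : List (String × List (String × String)) :=
  let archivo := (PySem.Dict.mk fila_dict).getD "Archivo" ""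
  let elem_id := (PySem.Dict.mk fila_dict).getD "ElementId" ""   -- str(... or "") is the string itself (or "")
  let clave := if archivo ≠ "" ∧ elem_id ≠ "" then archivo ++ "_" ++ elem_id else cod
  ((PySem.Dict.mk repo).insert clave fila_dict).items

def upsert_by_codintbim (repo : List (String × List (String × String))) (fila_dict : List (String × String)) : List (String × List (String × String)) :=
  let cod := pvCod fila_dict
  if cod = "" then repo
  else
    let coincidentes := (repo.filter (fun kv => pvCod kv.2 = cod)).map Prod.fst
    if coincidentes ≠ [] then
      (coincidentes.foldl (fun (r : PySem.Dict String (List (String × String))) k =>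
          r.insert k (pvUpd (r.getD k []) fila_dict)) (PySem.Dict.mk repo)).items
    else
      pvInsertNew repo fila_dict cod

-- ===== PORT B =====
-- keep = {f: v[f] for f in ("Archivo", "ElementId") if f in v}
def pvKeep (v : List (String × String)) : List (String × String) :=
  ((["Archivo", "ElementId"].filter (fun f => (PySem.Dict.mk v).contains f)).map
    (fun f => (f, (PySem.Dict.mk v).getD f "")))

-- out = dict(v); out.update(fila_dict); out.update(keep)
def pvMerge (v : List (String × String)) (fila_dict : List (String × String)) : List (String × String) :=
  ((pvKeep v).foldl (fun (d : PySem.Dict String String) cv => d.insert cv.1 cv.2)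
    (fila_dict.foldl (fun (d : PySem.Dict String String) cv => d.insert cv.1 cv.2)
      (PySem.Dict.mk v))).items

def upsert_by_codintbim_alt (repo : List (String × List (String × String))) (fila_dict : List (String × String)) : List (String × List (String × String)) :=
  let cod := pvCod fila_dict
  if cod = "" then repo
  else if cod ∈ PySem.Set.ofList (repo.map (fun kv => pvCod kv.2)) then
    repo.map (fun kv => if pvCod kv.2 = cod then (kv.1, pvMerge kv.2 fila_dict) else kv)
  else
    let archivo := (PySem.Dict.mk fila_dict).getD "Archivo" ""
    let elem_id := (PySem.Dict.mk fila_dict).getD "ElementId" ""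
    let clave := if archivo ≠ "" ∧ elem_id ≠ "" then archivo ++ "_" ++ elem_id else cod
    ((PySem.Dict.mk repo).insert clave fila_dict).items   -- out = dict(repo); out[clave] = dict(fila_dict)

-- ===== PRECONDITION & SPEC =====
-- Pre_ excludes association lists with duplicate keys (in repo, in fila_dict, or inside any
-- record of repo): Python dicts have unique keys, so such lists represent no Python input.
def Pre_upsert_by_codintbim (repo : List (String × List (String × String))) (fila_dict : List (String × String)) : Prop :=
  (repo.map Prod.fst).Nodup ∧ (∀ kv ∈ repo, (kv.2.map Prod.fst).Nodup) ∧ (fila_dict.map Prod.fst).Nodup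

instance (repo : List (String × List (String × String))) (fila_dict : List (String × String)) : Decidable (Pre_upsert_by_codintbim repo fila_dict) := by unfold Pre_upsert_by_codintbim; infer_instance

def pvWitness_upsert_by_codintbim : (List (String × List (String × String))) × (List (String × String)) :=
  ([("a", [("CodIntBIM", "x"), ("Archivo", "f1")]), ("b", [("CodIntBIM", "y")])],
   [("CodIntBIM", "x"), ("Archivo", "f2"), ("Campo", "1")])

def Spec_upsert_by_codintbim (repo : List (String × List (String × String))) (fila_dict : List (String × String)) (out : List (String × List (String × String))) : Prop := out = upsert_by_codintbim_alt repo fila_dict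
instance (repo : List (String × List (String × String))) (fila_dict : List (String × String)) (out : List (String × List (String × String))) : Decidable (Spec_upsert_by_codintbim repo fila_dict out) := by unfold Spec_upsert_by_codintbim; infer_instance

-- ===== CLAIM (what is proved, stated in full; the proofs are below) =====
def Claim_equal_upsert_by_codintbim : Prop := ∀ (repo : List (String × List (String × String))) (fila_dict : List (String × String)), Dom_upsert_by_codintbim repo fila_dict → Pre_upsert_by_codintbim repo fila_dict → Spec_upsert_by_codintbim repo fila_dict (upsert_by_codintbim repo fila_dict)

-- ===== LEMMAS AND PROOFS =====

-- with unique keys, a pair in the list is determined by its key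
theorem pv_key_inj {beta : Type} (l : List (String × beta)) (h : (l.map Prod.fst).Nodup) :
    ∀ p ∈ l, ∀ q ∈ l, p.1 = q.1 → p = q := by
  induction l with
  | nil => simp
  | cons x t ih =>
    simp only [List.map_cons, List.nodup_cons] at h
    intro p hp q hq hpq
    rcases List.mem_cons.mp hp with hp | hp <;> rcases List.mem_cons.mp hq with hq | hq
    · rw [hp, hq]
    · exfalso
      apply h.1
      have : q.1 ∈ t.map Prod.fst := List.mem_map_of_mem hq
      rw [hp] at hpq; rw [← hpq] at this; exact this
    · exfalso
      apply h.1
      have : p.1 ∈ t.map Prod.fst := List.mem_map_of_mem hp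
      rw [hq] at hpq; rw [hpq] at this; exact this
    · exact ih h.2 p hp q hq hpq

-- A's update loop over the matching keys rewrites exactly the matching entries in place
theorem pv_foldA (fila : List (String × String)) :
    ∀ (ks : List String) (d : PySem.Dict String (List (String × String))),
      d.keys.Nodup → ks.Nodup → (∀ k ∈ ks, k ∈ d.keys) →
      (ks.foldl (fun r k => r.insert k (pvUpd (r.getD k []) fila)) d).items
        = d.items.map (fun kv => if kv.1 ∈ ks then (kv.1, pvUpd kv.2 fila) else kv) := by
  intro ks
  induction ks with
  | nil =>
    intro d _ _ _
    simp
  | cons k ks ih =>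
    intro d hnd hks hmem
    have hk : k ∈ d.keys := hmem k (List.mem_cons_self ..)
    have hcont : d.contains k = true := (PySem.Dict.contains_iff_mem_keys ..).mpr hk
    simp only [List.foldl_cons]
    set d' : PySem.Dict String (List (String × String)) := d.insert k (pvUpd (d.getD k []) fila) with hd'
    have hkeys' : d'.keys = d.keys := PySem.Dict.keys_insert_of_contains _ _ hcont
    have hnodups : ks.Nodup := (List.nodup_cons.mp hks).2
    have hknot : k ∉ ks := (List.nodup_cons.mp hks).1
    rw [ih d' (hkeys' ▸ hnd) hnodups
      (fun k' hk' => hkeys' ▸ hmem k' (List.mem_cons_of_mem _ hk'))]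
    have hitems' : d'.items = d.items.map (fun p => if p.1 == k then (k, pvUpd (d.getD k []) fila) else p) :=
      PySem.Dict.items_insert_of_contains _ _ hcont
    rw [hitems', List.map_map]
    apply List.map_congr_left
    intro p hp
    by_cases hpk : p.1 = k
    · have hval : d.getD p.1 [] = p.2 := by
        obtain ⟨a, b⟩ := p
        exact PySem.Dict.getD_of_mem_items _ hp hnd []
      simp only [Function.comp_apply, hpk, beq_self_eq_true, if_true]
      have : (k : String) ∉ ks := hknot
      simp [this, hpk ▸ hval]
    · have hbeq : (p.1 == k) = false := beq_eq_false_iff_ne.mpr hpk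
      simp only [Function.comp_apply, hbeq, Bool.false_eq_true, if_false]
      by_cases hmemks : p.1 ∈ ks
      · simp [hmemks, List.mem_cons, hpk]
      · simp [hmemks, List.mem_cons, hpk]

-- two inserts at distinct keys commute when the first key is already present
theorem pv_insert_comm (d : PySem.Dict String String) (k v k' v' : String)
    (h : d.contains k = true) (hne : k' ≠ k) :
    (d.insert k v).insert k' v' = (d.insert k' v').insert k v := by
  apply PySem.Dict.ext
  have hck : (d.insert k' v').contains k = true := by
    rw [PySem.Dict.contains_insert]; simp [h]
  by_cases h' : d.contains k' = true
  · have hck' : (d.insert k v).contains k' = true := by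
      rw [PySem.Dict.contains_insert]; simp [h']
    rw [PySem.Dict.items_insert_of_contains _ _ hck', PySem.Dict.items_insert_of_contains _ _ h,
        PySem.Dict.items_insert_of_contains _ _ hck, PySem.Dict.items_insert_of_contains _ _ h']
    simp only [List.map_map]
    apply List.map_congr_left
    intro p _
    by_cases hpk : p.1 = k
    · have hkne : k ≠ k' := Ne.symm hne
      simp [Function.comp_apply, hpk, beq_iff_eq, hkne]
    · by_cases hpk' : p.1 = k'
      · simp [Function.comp_apply, hpk', beq_iff_eq, hne]
      · simp [Function.comp_apply, beq_iff_eq, hpk, hpk']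
  · have h'f : d.contains k' = false := by simpa using h'
    have hck' : (d.insert k v).contains k' = false := by
      rw [PySem.Dict.contains_insert]
      simp [h'f, hne]
    rw [PySem.Dict.items_insert_of_not_contains _ _ hck', PySem.Dict.items_insert_of_contains _ _ h,
        PySem.Dict.items_insert_of_contains _ _ hck, PySem.Dict.items_insert_of_not_contains _ _ h'f]
    rw [List.map_append]
    have hb : (k' == k) = false := by simp [hne]
    simp only [List.map_cons, List.map_nil, hb, Bool.false_eq_true, if_false]

-- an insert at k is absorbed by a later insert at k (any values)
theorem pv_insert_absorb (d : PySem.Dict String String) (k w v : String) :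
    (d.insert k w).insert k v = d.insert k v :=
  PySem.Dict.insert_insert_self ..

-- re-inserting the present value changes nothing
theorem pv_insert_getD_self (d : PySem.Dict String String) (k : String)
    (h : d.contains k = true) (hnd : d.keys.Nodup) :
    d.insert k (d.getD k "") = d := by
  apply PySem.Dict.ext
  rw [PySem.Dict.items_insert_of_contains _ _ h]
  conv_rhs => rw [← List.map_id d.items]
  apply List.map_congr_left
  intro p hp
  by_cases hpk : p.1 = k
  · have hval : d.getD p.1 "" = p.2 := by
      obtain ⟨a, b⟩ := p
      exact PySem.Dict.getD_of_mem_items _ hp hnd ""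
    simp only [hpk, beq_self_eq_true, if_true, id]
    rw [← hpk, hval]
  · simp [beq_iff_eq, hpk]

-- folding inserts preserves containment
theorem pv_contains_foldIns (l : List (String × String)) (d : PySem.Dict String String)
    (k : String) (h : d.contains k = true) :
    (l.foldl (fun d cv => d.insert cv.1 cv.2) d).contains k = true := by
  induction l generalizing d with
  | nil => exact h
  | cons cv t ih =>
    simp only [List.foldl_cons]
    exact ih _ (by rw [PySem.Dict.contains_insert]; simp [h])

-- an early insert at a key untouched by the fold commutes out of the fold
theorem pv_foldIns_insert_comm (t : List (String × String)) (e : PySem.Dict String String)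
    (a : String × String) (hc : e.contains a.1 = true) (hne : ∀ b ∈ t, b.1 ≠ a.1) :
    t.foldl (fun d cv => d.insert cv.1 cv.2) (e.insert a.1 a.2)
      = (t.foldl (fun d cv => d.insert cv.1 cv.2) e).insert a.1 a.2 := by
  induction t generalizing e with
  | nil => rfl
  | cons b t ih =>
    simp only [List.foldl_cons]
    rw [pv_insert_comm e a.1 a.2 b.1 b.2 hc (hne b (List.mem_cons_self ..))]
    exact ih _ (by rw [PySem.Dict.contains_insert]; simp [hc])
      (fun c hc' => hne c (List.mem_cons_of_mem _ hc'))

-- a prior insert at a key of kp is absorbed by folding kp's inserts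
theorem pv_restore_absorb (kp : List (String × String)) (E : PySem.Dict String String)
    (a : String × String) (hc : E.contains a.1 = true) (hmem : a.1 ∈ kp.map Prod.fst)
    (hnd : (kp.map Prod.fst).Nodup) :
    kp.foldl (fun d cv => d.insert cv.1 cv.2) (E.insert a.1 a.2)
      = kp.foldl (fun d cv => d.insert cv.1 cv.2) E := by
  induction kp generalizing E with
  | nil => simp at hmem
  | cons b t ih =>
    simp only [List.foldl_cons]
    by_cases hb : b.1 = a.1
    · rw [hb, pv_insert_absorb]
    · have hmem' : a.1 ∈ t.map Prod.fst := by
        simp only [List.map_cons, List.mem_cons] at hmem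
        rcases hmem with h | h
        · exact absurd h.symm hb
        · exact h
      rw [pv_insert_comm E a.1 a.2 b.1 b.2 hc hb]
      exact ih _ (by rw [PySem.Dict.contains_insert]; simp [hc]) hmem'
        ((List.nodup_cons.mp (by simpa only [List.map_cons] using hnd)).2)

-- keep-list of a fixed original dict d0
def pvKeepD (d0 : PySem.Dict String String) : List (String × String) :=
  (["Archivo", "ElementId"].filter (fun f => d0.contains f)).map (fun f => (f, d0.getD f ""))

-- MAIN: A's skip-protected update loop = insert-all then restore the protected snapshot
theorem pv_main (d0 : PySem.Dict String String) :
    ∀ (fila : List (String × String)) (e : PySem.Dict String String),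
      (fila.map Prod.fst).Nodup → e.keys.Nodup →
      (∀ cv ∈ fila, e.contains cv.1 = d0.contains cv.1) →
      (∀ f : String, (f = "Archivo" ∨ f = "ElementId") → d0.contains f = true →
        e.contains f = true ∧ e.getD f "" = d0.getD f "") →
      fila.foldl (fun dd cv =>
          if (cv.1 == "Archivo" || cv.1 == "ElementId") && dd.contains cv.1 then dd
          else dd.insert cv.1 cv.2) e
        = (pvKeepD d0).foldl (fun d cv => d.insert cv.1 cv.2)
            (fila.foldl (fun d cv => d.insert cv.1 cv.2) e) := by
  intro fila
  induction fila with
  | nil =>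
    intro e _ hnd _ hkeep
    simp only [List.foldl_nil]
    unfold pvKeepD
    by_cases hA : d0.contains "Archivo" = true <;> by_cases hE : d0.contains "ElementId" = true
    · have kA := hkeep "Archivo" (Or.inl rfl) hA
      have kE := hkeep "ElementId" (Or.inr rfl) hE
      simp only [List.filter, hA, hE, List.map_cons, List.map_nil, List.foldl_cons, List.foldl_nil]
      rw [← kA.2, pv_insert_getD_self e _ kA.1 hnd, ← kE.2, pv_insert_getD_self e _ kE.1 hnd]
    · have kA := hkeep "Archivo" (Or.inl rfl) hA
      simp only [List.filter, hA, hE, List.map_cons, List.map_nil, List.foldl_cons, List.foldl_nil]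
      rw [← kA.2, pv_insert_getD_self e _ kA.1 hnd]
    · have kE := hkeep "ElementId" (Or.inr rfl) hE
      simp only [List.filter, hA, hE, List.map_cons, List.map_nil, List.foldl_cons, List.foldl_nil]
      rw [← kE.2, pv_insert_getD_self e _ kE.1 hnd]
    · simp only [List.filter, hA, hE, List.map_nil, List.foldl_nil]
  | cons cv t ih =>
    intro e hnodup hnd hcont hkeep
    have hnodup' : (t.map Prod.fst).Nodup := (List.nodup_cons.mp (by simpa using hnodup)).2
    have hnotin : cv.1 ∉ t.map Prod.fst := (List.nodup_cons.mp (by simpa using hnodup)).1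
    have hne_t : ∀ b ∈ t, b.1 ≠ cv.1 := fun b hb hh =>
      hnotin (hh ▸ List.mem_map_of_mem hb)
    simp only [List.foldl_cons]
    by_cases hP : ((cv.1 == "Archivo" || cv.1 == "ElementId") && e.contains cv.1) = true
    · rw [if_pos hP]
      have hP' : (cv.1 = "Archivo" ∨ cv.1 = "ElementId") ∧ e.contains cv.1 = true := by
        simpa [beq_iff_eq] using hP
      have hec : e.contains cv.1 = true := hP'.2
      have hd0c : d0.contains cv.1 = true := by
        rw [← hcont cv (List.mem_cons_self ..)]; exact hec
      have hmemkp : cv.1 ∈ (pvKeepD d0).map Prod.fst := by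
        unfold pvKeepD
        rw [List.map_map]
        refine List.mem_map.mpr ⟨cv.1, List.mem_filter.mpr ⟨?_, hd0c⟩, rfl⟩
        rcases hP'.1 with h | h <;> simp [h]
      have hndkp : ((pvKeepD d0).map Prod.fst).Nodup := by
        unfold pvKeepD
        rw [List.map_map]
        refine List.Nodup.map (fun a b h => h) ?_
        exact List.Nodup.filter _ (by decide)
      rw [pv_foldIns_insert_comm t e cv hec hne_t,
          pv_restore_absorb (pvKeepD d0) _ cv (pv_contains_foldIns t e cv.1 hec) hmemkp hndkp]
      exact ih e hnodup' hnd (fun b hb => hcont b (List.mem_cons_of_mem _ hb)) hkeep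
    · rw [if_neg hP]
      refine ih (e.insert cv.1 cv.2) hnodup' (PySem.Dict.nodup_keys_insert _ _ _ hnd) ?_ ?_
      · intro b hb
        rw [PySem.Dict.contains_insert]
        rw [beq_eq_false_iff_ne.mpr (hne_t b hb), Bool.false_or]
        exact hcont b (List.mem_cons_of_mem _ hb)
      · intro f hf hd0f
        have hk := hkeep f hf hd0f
        have hfne : f ≠ cv.1 := by
          intro hh
          apply hP
          subst hh
          have hb : (cv.1 == "Archivo" || cv.1 == "ElementId") = true := by
            rcases hf with h | h <;> simp [h]
          rw [hb, Bool.true_and]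
          exact hk.1
        constructor
        · rw [PySem.Dict.contains_insert]
          simp [hk.1]
        · rw [PySem.Dict.getD_insert, if_neg hfne]
          exact hk.2

-- the inner updates agree: pvUpd = pvMerge on nodup-key records
theorem pv_upd_eq_merge (v fila : List (String × String))
    (hf : (fila.map Prod.fst).Nodup) (hv : (v.map Prod.fst).Nodup) :
    pvUpd v fila = pvMerge v fila := by
  unfold pvUpd pvMerge
  have hnd : (PySem.Dict.mk v).keys.Nodup := by simpa [PySem.Dict.keys_mk] using hv
  have hmain := pv_main (PySem.Dict.mk v) fila (PySem.Dict.mk v) hf hnd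
    (fun _ _ => rfl) (fun f _ h => ⟨h, rfl⟩)
  rw [hmain]
  rfl

-- ===== VERDICT (by name: the statement is the Claim_ definition above) =====
theorem upsert_by_codintbim_spec : Claim_equal_upsert_by_codintbim := by
  intro repo fila _hdom hpre
  obtain ⟨hpre1, hpre2, hpre3⟩ := hpre
  unfold Spec_upsert_by_codintbim upsert_by_codintbim upsert_by_codintbim_alt
  simp only []
  by_cases hc : pvCod fila = ""
  · simp [hc]
  · simp only [hc, if_false]
    set co : List String := (repo.filter (fun kv => pvCod kv.2 = pvCod fila)).map Prod.fst with hco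
    have hmemiff : pvCod fila ∈ PySem.Set.ofList (repo.map (fun kv => pvCod kv.2)) ↔ co ≠ [] := by
      rw [PySem.Set.mem_ofList]
      constructor
      · intro h
        obtain ⟨kv, hkv, hkveq⟩ := List.mem_map.mp h
        intro hnil
        have : kv ∈ repo.filter (fun kv => pvCod kv.2 = pvCod fila) :=
          List.mem_filter.mpr ⟨hkv, decide_eq_true hkveq⟩
        exact List.ne_nil_of_mem (List.mem_map_of_mem (f := Prod.fst) this) (hco ▸ hnil)
      · intro h
        have hfilne : repo.filter (fun kv => pvCod kv.2 = pvCod fila) ≠ [] := by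
          intro hh; exact h (by rw [hco, hh, List.map_nil])
        obtain ⟨kv0, hkv0⟩ := List.exists_mem_of_ne_nil _ hfilne
        have hkv0' := List.mem_filter.mp hkv0
        exact List.mem_map.mpr ⟨kv0, hkv0'.1, of_decide_eq_true hkv0'.2⟩
    by_cases hne : co ≠ []
    · -- match found: A's fold over the keys = B's entrywise map
      rw [if_pos hne, if_pos (hmemiff.mpr hne)]
      have hconodup : co.Nodup := by
        refine List.Nodup.sublist ?_ hpre1
        exact List.Sublist.map Prod.fst List.filter_sublist
      have hcomem : ∀ k ∈ co, k ∈ (PySem.Dict.mk repo).keys := by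
        intro k hk
        obtain ⟨kv, hkvf, rfl⟩ := List.mem_map.mp hk
        simp only [PySem.Dict.keys_mk]
        exact List.mem_map_of_mem (List.mem_of_mem_filter hkvf)
      have hndk : (PySem.Dict.mk repo).keys.Nodup := by
        simpa only [PySem.Dict.keys_mk] using hpre1
      rw [pv_foldA fila co (PySem.Dict.mk repo) hndk hconodup hcomem]
      apply List.map_congr_left
      intro kv hkv
      have hiff : kv.1 ∈ co ↔ pvCod kv.2 = pvCod fila := by
        constructor
        · intro hmem
          obtain ⟨kv', hkv'f, hfst⟩ := List.mem_map.mp hmem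
          have hkv'' := List.mem_filter.mp hkv'f
          have : kv' = kv := pv_key_inj repo hpre1 kv' (List.mem_of_mem_filter hkv'f) kv hkv hfst
          have hp := hkv''.2
          rw [this] at hp
          exact of_decide_eq_true hp
        · intro hp
          exact List.mem_map_of_mem (List.mem_filter.mpr ⟨hkv, decide_eq_true hp⟩)
      by_cases hp : pvCod kv.2 = pvCod fila
      · simp only [hp, hiff.mpr hp, if_pos]
        rw [pv_upd_eq_merge kv.2 fila hpre3 (hpre2 kv hkv)]
      · have hnotin : kv.1 ∉ co := fun h => hp (hiff.mp h)
        simp [hp, hnotin]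
    · rw [if_neg hne, if_neg (fun h => hne (hmemiff.mp h))]
      rfl
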